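-- pv_equiv track=rewrite | github.com/Halftruth08/Game_AI | codenames/data_collection.py | targetlist_update
-- ===== SOURCE A (Python) =====
-- def targetlist_update(bigrams,targs,mincut):
--     bg3 = {}
--     #    bigs=[]
--     #    nums=[]
--     targetlist = []
--     for i2 in bigrams.keys():
--         bg3[i2]={}
--         for i3 in bigrams[i2].keys():
--             if max(bigrams[i2][i3]) > mincut:
--                 bg3[i2][i3] = bigrams[i2][i3]
--     for i2 in bg3.keys():
--         #        m=dc.get(i,0)
--         #        if not m == 0:
--         tl = []
--         for i3 in bg3[i2]:  # get the number of times better collocation is found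
--             temp = max(bg3.get(i2,0).get(i3,0))
--             if not temp == 0:
--                 tl.append((temp, i3))
--                 if not i3 in bg3.keys():
--                     targetlist.append(i3)
--         tl.sort(key=lambda x: x[0], reverse=True)
--         if not len(tl) == 0:
--             targs[i2] = tl
--     return targs,targetlist
-- ===== SOURCE B (Python) =====
-- def targetlist_update(bigrams, targs, mincut):
--     # B: two independent derived computations (one flat comprehension for targetlist,
--     # one per-key sorted-kept-pairs update for targs) instead of A's intermediate bg3
--     # dict copy followed by a fused stateful second loop. Mutates targs in place like A.
--     def kept(counts):
--         m = max(counts)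
--         return m if m > mincut and m != 0 else None
--
--     targetlist = [i3 for inner in bigrams.values()
--                      for i3, counts in inner.items()
--                      if kept(counts) is not None and i3 not in bigrams]
--     for i2, inner in bigrams.items():
--         tl = sorted(((m, i3) for i3, counts in inner.items()
--                      for m in (kept(counts),) if m is not None),
--                     key=lambda x: x[0], reverse=True)
--         if tl:
--             targs[i2] = tl
--     return targs, targetlist
-- ===== Notes on version B (the rewrite author's own statement) =====
-- stated objective: simpler
-- what changed: Replaces A's intermediate bg3 dict copy plus a fused stateful second loop with two independent derived computations: targetlist as one flat comprehension over all inner items, and targs updated key-by-key from freshly computed sorted kept pairs, with 'i3 not in bigrams' replacing 'i3 not in bg3.keys()' (bg3 held exactly bigrams' keys).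
-- outside the precondition, e.g. on targetlist_update({'a': {'b': []}}, {}, 0): A raises ValueError, B raises ValueError
import Mathlib
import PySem

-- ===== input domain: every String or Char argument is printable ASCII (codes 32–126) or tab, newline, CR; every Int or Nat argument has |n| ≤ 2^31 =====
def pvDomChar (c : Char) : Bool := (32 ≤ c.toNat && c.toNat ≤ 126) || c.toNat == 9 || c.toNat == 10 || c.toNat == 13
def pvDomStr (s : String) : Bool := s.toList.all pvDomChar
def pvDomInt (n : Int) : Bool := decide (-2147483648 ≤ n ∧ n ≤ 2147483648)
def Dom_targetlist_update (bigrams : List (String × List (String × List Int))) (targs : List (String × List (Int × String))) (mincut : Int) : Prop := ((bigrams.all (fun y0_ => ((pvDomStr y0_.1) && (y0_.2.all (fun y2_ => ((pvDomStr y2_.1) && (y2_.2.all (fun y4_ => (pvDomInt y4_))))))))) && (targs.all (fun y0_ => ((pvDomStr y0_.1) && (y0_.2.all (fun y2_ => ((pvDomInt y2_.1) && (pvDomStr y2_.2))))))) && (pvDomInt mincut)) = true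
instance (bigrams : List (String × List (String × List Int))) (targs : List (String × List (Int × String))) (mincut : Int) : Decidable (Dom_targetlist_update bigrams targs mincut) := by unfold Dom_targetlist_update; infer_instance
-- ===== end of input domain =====

-- B replaces A's intermediate bg3 dict + fused stateful second loop by two independent derived
-- computations (objective: simpler). Both Pythons mutate `targs` in place identically; the
-- equivalence proved is about the return value.

-- ===== PORT A =====
-- max(l) over a nonempty list (Pre_ guarantees nonemptiness; the default is never reached inside Pre_)
def pymaxI (l : List Int) : Int := (PySem.List.max? l (fun x => x)).getD 0

-- first loop's inner body: the filtered dict stored at bg3[i2]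
def innerD (mincut : Int) (l : List (String × List Int)) : PySem.Dict String (List Int) :=
  l.foldl (fun d q => if pymaxI q.2 > mincut then d.insert q.1 q.2 else d) PySem.Dict.empty

-- second loop's body (one iteration, i2 ranging over bg3.keys)
-- (Python's bg3.get(i2,0)/.get(i3,0) defaults 0 are unreachable — i2 ∈ bg3, i3 ∈ bg3[i2] —
--  so they are rendered by the type-correct defaults Dict.empty / [])
def stepA (bg3 : PySem.Dict String (PySem.Dict String (List Int)))
    (st : PySem.Dict String (List (Int × String)) × List String) (i2 : String) :
    PySem.Dict String (List (Int × String)) × List String :=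
  let r := (bg3.getD i2 PySem.Dict.empty).keys.foldl (fun r i3 =>
      let temp := pymaxI ((bg3.getD i2 PySem.Dict.empty).getD i3 [])
      if temp ≠ 0 then
        (r.1 ++ [(temp, i3)], if bg3.contains i3 then r.2 else r.2 ++ [i3])
      else r) ([], st.2)
  let tl := PySem.List.sorted r.1 (fun x => x.1) true
  if tl.length ≠ 0 then (st.1.insert i2 tl, r.2) else (st.1, r.2)

def targetlist_update (bigrams : List (String × List (String × List Int))) (targs : List (String × List (Int × String))) (mincut : Int) : (List (String × List (Int × String))) × List String :=
  let bg3 := bigrams.foldl (fun bg3 p => bg3.insert p.1 (innerD mincut p.2)) PySem.Dict.empty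
  let st := bg3.keys.foldl (stepA bg3) (PySem.Dict.mk targs, [])
  (st.1.items, st.2)

-- ===== PORT B =====
-- kept(counts): Some m when m = max(counts) passes both guards, else None
def keptM (mincut : Int) (counts : List Int) : Option Int :=
  let m := pymaxI counts
  if m > mincut ∧ m ≠ 0 then some m else none

def targetlist_update_alt (bigrams : List (String × List (String × List Int))) (targs : List (String × List (Int × String))) (mincut : Int) : (List (String × List (Int × String))) × List String :=
  let targetlist := bigrams.flatMap (fun p =>
    p.2.filterMap (fun q =>
      if (keptM mincut q.2).isSome ∧ ¬ bigrams.any (fun b => b.1 == q.1) then some q.1 else none))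
  let d := bigrams.foldl (fun d p =>
    let tl := PySem.List.sorted
      (p.2.filterMap (fun q => (keptM mincut q.2).map (fun m => (m, q.1)))) (fun x => x.1) true
    if tl ≠ [] then d.insert p.1 tl else d) (PySem.Dict.mk targs)
  (d.items, targetlist)

-- ===== PRECONDITION & SPEC =====
-- Pre_ excludes inputs where some inner count list is empty (Python's max([]) raises ValueError there)
-- and assoc lists with duplicate keys at any dict level, which do not represent Python dicts.
def Pre_targetlist_update (bigrams : List (String × List (String × List Int))) (targs : List (String × List (Int × String))) (mincut : Int) : Prop :=
  (bigrams.map Prod.fst).Nodup ∧ (targs.map Prod.fst).Nodup ∧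
  ∀ p ∈ bigrams, (p.2.map Prod.fst).Nodup ∧ ∀ q ∈ p.2, q.2 ≠ []
instance (bigrams : List (String × List (String × List Int))) (targs : List (String × List (Int × String))) (mincut : Int) : Decidable (Pre_targetlist_update bigrams targs mincut) := by unfold Pre_targetlist_update; infer_instance

def pvWitness_targetlist_update : (List (String × List (String × List Int))) × (List (String × List (Int × String))) × Int :=
  ([("ab", [("cd", [2, 1]), ("ef", [0])])], [("x", [(1, "y")])], 1)

def Spec_targetlist_update (bigrams : List (String × List (String × List Int))) (targs : List (String × List (Int × String))) (mincut : Int) (out : (List (String × List (Int × String))) × List String) : Prop := out = targetlist_update_alt bigrams targs mincut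
instance (bigrams : List (String × List (String × List Int))) (targs : List (String × List (Int × String))) (mincut : Int) (out : (List (String × List (Int × String))) × List String) : Decidable (Spec_targetlist_update bigrams targs mincut out) := by unfold Spec_targetlist_update; infer_instance

-- ===== CLAIM (what is proved, stated in full; the proofs are below) =====
def Claim_equal_targetlist_update : Prop := ∀ (bigrams : List (String × List (String × List Int))) (targs : List (String × List (Int × String))) (mincut : Int), Dom_targetlist_update bigrams targs mincut → Pre_targetlist_update bigrams targs mincut → Spec_targetlist_update bigrams targs mincut (targetlist_update bigrams targs mincut)

-- ===== LEMMAS AND PROOFS =====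

theorem innerD_items (mincut : Int) (l : List (String × List Int))
    (h : (l.map Prod.fst).Nodup) :
    (innerD mincut l).items = l.filter (fun q => decide (pymaxI q.2 > mincut)) := by
  unfold innerD
  have hf : l.foldl (fun d q => if pymaxI q.2 > mincut then d.insert q.1 q.2 else d)
      PySem.Dict.empty
      = (l.filter (fun q => decide (pymaxI q.2 > mincut))).foldl
          (fun d q => d.insert q.1 q.2) PySem.Dict.empty := by
    rw [List.foldl_filter]
    apply PySem.List.foldl_congr_mem
    intro acc x _
    simp
  rw [hf, PySem.Dict.items_foldl_insert_fresh _ Prod.fst Prod.snd _ (by simp)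
    ((List.filter_sublist.map Prod.fst).nodup h)]
  simp [PySem.Dict.empty]

theorem bg3_items (bigrams : List (String × List (String × List Int))) (mincut : Int)
    (hb : (bigrams.map Prod.fst).Nodup) :
    (bigrams.foldl (fun bg3 p => bg3.insert p.1 (innerD mincut p.2)) PySem.Dict.empty).items
      = bigrams.map (fun p => (p.1, innerD mincut p.2)) := by
  rw [PySem.Dict.items_foldl_insert_fresh _ Prod.fst (fun p => innerD mincut p.2) _ (by simp) hb]
  simp [PySem.Dict.empty]

theorem bg3_keys (bigrams : List (String × List (String × List Int))) (mincut : Int)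
    (hb : (bigrams.map Prod.fst).Nodup) :
    (bigrams.foldl (fun bg3 p => bg3.insert p.1 (innerD mincut p.2)) PySem.Dict.empty).keys
      = bigrams.map Prod.fst := by
  simp only [PySem.Dict.keys, bg3_items bigrams mincut hb, List.map_map]
  rfl

theorem bg3_contains (bigrams : List (String × List (String × List Int))) (mincut : Int)
    (hb : (bigrams.map Prod.fst).Nodup) (x : String) :
    (bigrams.foldl (fun bg3 p => bg3.insert p.1 (innerD mincut p.2)) PySem.Dict.empty).contains x
      = bigrams.any (fun b => b.1 == x) := by
  rw [PySem.Dict.contains_eq_decide_mem_keys, bg3_keys bigrams mincut hb]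
  cases hx : bigrams.any (fun b => b.1 == x) <;>
    simp_all [List.any_eq_true, List.mem_map]
  intro l hl
  exact hx x l hl rfl

-- generic: a fold that appends to both components of a pair splits into two filterMaps
theorem foldl_pair_split {α β γ : Type} (l : List α)
    (c : α → Bool) (f : α → β) (d : α → Bool) (h : α → γ)
    (a : List β) (b : List γ) :
    l.foldl (fun r q => if c q then (r.1 ++ [f q], if d q then r.2 else r.2 ++ [h q]) else r) (a, b)
      = (a ++ l.filterMap (fun q => if c q then some (f q) else none),
         b ++ l.filterMap (fun q => if c q && !(d q) then some (h q) else none)) := by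
  induction l generalizing a b with
  | nil => simp
  | cons x xs ih =>
    by_cases hc : c x
    · by_cases hd : d x <;> simp [hc, hd, ih]
    · simp [hc, ih]

-- generic: a stateful fold whose targetlist component only appends splits off as a flatMap
theorem foldl_state_split {α β γ : Type} (l : List α)
    (F : β → α → β) (G : α → List γ) (d0 : β) (t0 : List γ) :
    l.foldl (fun st q => (F st.1 q, st.2 ++ G q)) (d0, t0) = (l.foldl F d0, t0 ++ l.flatMap G) := by
  induction l generalizing d0 t0 with
  | nil => simp
  | cons x xs ih => simp [ih, List.append_assoc]

theorem tail_eq (d : PySem.Dict String (List (Int × String))) (i2 : String)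
    (tl : List (Int × String)) (r2 : List String) :
    (if tl.length ≠ 0 then (d.insert i2 tl, r2) else (d, r2))
      = (if tl ≠ [] then d.insert i2 tl else d, r2) := by
  by_cases h : tl = [] <;> simp [h]

-- per-key: one iteration of A's second loop equals B's dict step paired with B's targetlist contribution
theorem step_eq (bigrams : List (String × List (String × List Int))) (mincut : Int)
    (hb : (bigrams.map Prod.fst).Nodup)
    (p : String × List (String × List Int)) (hp : p ∈ bigrams)
    (hinner : (p.2.map Prod.fst).Nodup)
    (st : PySem.Dict String (List (Int × String)) × List String) :
    stepA (bigrams.foldl (fun bg3 p => bg3.insert p.1 (innerD mincut p.2)) PySem.Dict.empty) st p.1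
      = ((fun d (p : String × List (String × List Int)) =>
            let tl := PySem.List.sorted
              (p.2.filterMap (fun q => (keptM mincut q.2).map (fun m => (m, q.1)))) (fun x => x.1) true
            if tl ≠ [] then d.insert p.1 tl else d) st.1 p,
         st.2 ++ p.2.filterMap (fun q =>
            if (keptM mincut q.2).isSome ∧ ¬ bigrams.any (fun b => b.1 == q.1) then some q.1 else none)) := by
  set bg3 := bigrams.foldl (fun bg3 p => bg3.insert p.1 (innerD mincut p.2)) PySem.Dict.empty with hbg3
  have hknd : bg3.keys.Nodup := by rw [hbg3, bg3_keys bigrams mincut hb]; exact hb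
  have hmem : (p.1, innerD mincut p.2) ∈ bg3.items := by
    rw [hbg3, bg3_items bigrams mincut hb]; exact List.mem_map_of_mem hp
  have hgd : bg3.getD p.1 PySem.Dict.empty = innerD mincut p.2 :=
    PySem.Dict.getD_of_mem_items bg3 hmem hknd _
  have hinnd : (innerD mincut p.2).keys.Nodup := by
    simp only [PySem.Dict.keys, innerD_items mincut p.2 hinner]
    exact (List.filter_sublist.map Prod.fst).nodup hinner
  have hikeys : (innerD mincut p.2).keys
      = (p.2.filter (fun q => decide (pymaxI q.2 > mincut))).map Prod.fst := by
    simp only [PySem.Dict.keys, innerD_items mincut p.2 hinner]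
  unfold stepA
  rw [hgd, hikeys, List.foldl_map, List.foldl_filter]
  have hr : p.2.foldl
      (fun r q => if decide (pymaxI q.2 > mincut) = true then
          (fun r (i3 : String) =>
            let temp := pymaxI ((innerD mincut p.2).getD i3 [])
            if temp ≠ 0 then
              (r.1 ++ [(temp, i3)], if bg3.contains i3 then r.2 else r.2 ++ [i3])
            else r) r q.1
        else r)
      (([] : List (Int × String)), st.2)
      = p.2.foldl (fun r q =>
          if (decide (pymaxI q.2 > mincut) && decide (pymaxI q.2 ≠ 0)) then
            (r.1 ++ [(pymaxI q.2, q.1)],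
             if bigrams.any (fun b => b.1 == q.1) then r.2 else r.2 ++ [q.1])
          else r)
        (([] : List (Int × String)), st.2) := by
    apply PySem.List.foldl_congr_mem
    intro acc q hq
    by_cases hc : pymaxI q.2 > mincut
    · have hqm : (q.1, q.2) ∈ (innerD mincut p.2).items := by
        rw [innerD_items mincut p.2 hinner]
        exact List.mem_filter.mpr ⟨hq, by simpa using hc⟩
      have hg2 : (innerD mincut p.2).getD q.1 [] = q.2 :=
        PySem.Dict.getD_of_mem_items _ hqm hinnd _
      have hcont : bg3.contains q.1 = bigrams.any (fun b => b.1 == q.1) := by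
        rw [hbg3]; exact bg3_contains bigrams mincut hb q.1
      simp only [hc, decide_true, if_true, hg2, hcont, Bool.true_and]
      by_cases hz : pymaxI q.2 ≠ 0
      · simp [hz]
      · simp [hz]
    · simp [hc]
  rw [hr, foldl_pair_split p.2
    (fun q => decide (pymaxI q.2 > mincut) && decide (pymaxI q.2 ≠ 0))
    (fun q => (pymaxI q.2, q.1))
    (fun q => bigrams.any (fun b => b.1 == q.1))
    (fun q => q.1)]
  have hfm1 : p.2.filterMap (fun q =>
      if decide (pymaxI q.2 > mincut) && decide (pymaxI q.2 ≠ 0) then some (pymaxI q.2, q.1) else none)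
      = p.2.filterMap (fun q => (keptM mincut q.2).map (fun m => (m, q.1))) := by
    apply List.filterMap_congr
    intro q _
    by_cases h1 : pymaxI q.2 > mincut ∧ pymaxI q.2 ≠ 0
    · simp [keptM, h1]
    · rcases (not_and_or.mp h1) with h | h <;> simp [keptM, h]
  have hfm2 : p.2.filterMap (fun q =>
      if (decide (pymaxI q.2 > mincut) && decide (pymaxI q.2 ≠ 0)) && !(bigrams.any (fun b => b.1 == q.1))
      then some q.1 else none)
      = p.2.filterMap (fun q =>
          if (keptM mincut q.2).isSome ∧ ¬ bigrams.any (fun b => b.1 == q.1) then some q.1 else none) := by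
    apply List.filterMap_congr
    intro q _
    by_cases h1 : pymaxI q.2 > mincut ∧ pymaxI q.2 ≠ 0
    · by_cases h2 : bigrams.any (fun b => b.1 == q.1) = true <;>
        simp [keptM, h1, h2]
    · rcases (not_and_or.mp h1) with h | h <;> simp [keptM, h]
  simp only [hfm1, hfm2]
  exact tail_eq st.1 p.1 _ _

-- ===== VERDICT (by name: the statement is the Claim_ definition above) =====
theorem targetlist_update_spec : Claim_equal_targetlist_update := by
  intro bigrams targs mincut _ hpre
  obtain ⟨hb, _, hinner⟩ := hpre
  unfold Spec_targetlist_update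
  simp only [targetlist_update, targetlist_update_alt]
  rw [bg3_keys bigrams mincut hb, List.foldl_map]
  have hfold : bigrams.foldl
      (fun st p => stepA (bigrams.foldl (fun bg3 p => bg3.insert p.1 (innerD mincut p.2)) PySem.Dict.empty) st p.1)
      (PySem.Dict.mk targs, ([] : List String))
      = bigrams.foldl
        (fun st p =>
          ((fun d (p : String × List (String × List Int)) =>
              let tl := PySem.List.sorted
                (p.2.filterMap (fun q => (keptM mincut q.2).map (fun m => (m, q.1)))) (fun x => x.1) true
              if tl ≠ [] then d.insert p.1 tl else d) st.1 p,
           st.2 ++ p.2.filterMap (fun q =>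
              if (keptM mincut q.2).isSome ∧ ¬ bigrams.any (fun b => b.1 == q.1) then some q.1 else none)))
        (PySem.Dict.mk targs, ([] : List String)) := by
    apply PySem.List.foldl_congr_mem
    intro st p hp
    exact step_eq bigrams mincut hb p hp (hinner p hp).1 st
  rw [hfold, foldl_state_split bigrams
    (fun d (p : String × List (String × List Int)) =>
      let tl := PySem.List.sorted
        (p.2.filterMap (fun q => (keptM mincut q.2).map (fun m => (m, q.1)))) (fun x => x.1) true
      if tl ≠ [] then d.insert p.1 tl else d)
    (fun p : String × List (String × List Int) => p.2.filterMap (fun q =>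
      if (keptM mincut q.2).isSome ∧ ¬ bigrams.any (fun b => b.1 == q.1) then some q.1 else none))
    (PySem.Dict.mk targs) []]
  simp
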